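-- pv_equiv track=rewrite | github.com/up4472/upolanc-thesis | source/python/data/feature/feature_target.py | distribution_group
-- ===== SOURCE A (Python) =====
-- from typing                import Dict
-- from typing                import List
--
-- def distribution_group (data : Dict[str, Dict], genes : List[str], order : Dict[str, List], select : str = 'mean') -> Dict[str, Dict] :
-- 	"""
-- 	Doc
-- 	"""
--
-- 	dist = dict()
-- 	gene = list(data.keys())[0]
--
-- 	groups = [
-- 		(key, len(value))
-- 		for key, value in data[gene].items()
-- 		if key.endswith(select)
-- 	]
--
-- 	for group, length in groups :
-- 		for index in range(length) :
-- 			gkey = group.split('-')[0]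
-- 			tkey = order[gkey][index]
--
-- 			if gkey not in dist.keys() :
-- 				dist[gkey] = dict()
-- 			if tkey not in dist[gkey].keys() :
-- 				dist[gkey][tkey] = list()
--
-- 			for gene in genes :
-- 				dist[gkey][tkey].extend([
-- 					data[gene][group][index]
-- 				])
--
-- 	return dist
-- ===== SOURCE B (Python) =====
-- def distribution_group(data, genes, order, select='mean'):
--     gene = next(iter(data))
--     table = {}
--     for group, values in data[gene].items():
--         if not group.endswith(select):
--             continue
--         gkey = group.split('-')[0]
--         for index in range(len(values)):
--             table.setdefault(gkey, {}).setdefault(order[gkey][index], []).append((group, index))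
--     return {
--         gkey: {
--             tkey: [data[g][group][index] for (group, index) in positions for g in genes]
--             for tkey, positions in inner.items()
--         }
--         for gkey, inner in table.items()
--     }
-- ===== Notes on version B (the rewrite author's own statement) =====
-- stated objective: alternative
-- what changed: A interleaves everything in one triple-nested append loop over groups/indices/genes; B first builds a table mapping each (gkey, tkey) to its ordered (group, index) positions in a single pass, then fills the result with one nested comprehension over that table.
import Mathlib
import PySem

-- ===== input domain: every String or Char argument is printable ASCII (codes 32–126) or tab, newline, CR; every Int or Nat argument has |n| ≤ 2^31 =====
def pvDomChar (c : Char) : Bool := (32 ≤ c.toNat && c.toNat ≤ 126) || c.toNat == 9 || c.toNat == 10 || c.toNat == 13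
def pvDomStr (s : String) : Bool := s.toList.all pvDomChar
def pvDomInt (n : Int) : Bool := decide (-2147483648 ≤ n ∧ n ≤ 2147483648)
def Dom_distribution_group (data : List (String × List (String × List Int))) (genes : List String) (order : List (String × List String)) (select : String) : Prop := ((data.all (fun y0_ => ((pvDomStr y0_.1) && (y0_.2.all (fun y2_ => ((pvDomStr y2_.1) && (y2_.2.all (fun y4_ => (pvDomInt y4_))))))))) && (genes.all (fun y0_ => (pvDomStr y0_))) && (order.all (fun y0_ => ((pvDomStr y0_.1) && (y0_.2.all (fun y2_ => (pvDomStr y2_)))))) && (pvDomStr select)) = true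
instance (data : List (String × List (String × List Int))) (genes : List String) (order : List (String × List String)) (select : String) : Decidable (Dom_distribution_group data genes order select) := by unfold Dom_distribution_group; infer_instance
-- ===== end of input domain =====

-- B replaces A's interleaved append loop by a table-then-fill decomposition: one pass collects,
-- per (gkey, tkey), the (group, index) positions, and a final nested map fills in the gene values
-- (objective: alternative decomposition, same asymptotic cost; equivalence of RETURN values).

-- ===== PORT A =====
-- dicts are association lists (first-match lookup); A raises where a lookup/index below
-- falls back to its `getD` default — exactly those inputs are excluded by Pre_ below.
def distribution_group (data : List (String × List (String × List Int))) (genes : List String) (order : List (String × List String)) (select : String) : List (String × List (String × List Int)) :=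
  let d0 : List (String × List Int) := match data with
    | [] => []
    | (_, v) :: _ => v
  let groups : List (String × Nat) :=
    (d0.filter (fun kv => PySem.Str.endswith kv.1 select)).map (fun kv => (kv.1, kv.2.length))
  let dist : PySem.Dict String (PySem.Dict String (List Int)) :=
    groups.foldl (fun dist gl =>
      (List.range gl.2).foldl (fun dist index =>
        let gkey := ((PySem.Str.split? gl.1 "-").getD []).headD ""
        let tkey := ((order.lookup gkey).getD []).getD index ""
        let dist := if dist.contains gkey then dist else dist.insert gkey PySem.Dict.empty
        let inner0 := dist.getD gkey PySem.Dict.empty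
        let dist := if inner0.contains tkey then dist else dist.insert gkey (inner0.insert tkey [])
        genes.foldl (fun dist gene =>
          let v : Int := ((((data.lookup gene).getD []).lookup gl.1).getD []).getD index 0
          let inner := dist.getD gkey PySem.Dict.empty
          dist.insert gkey (inner.insert tkey (inner.getD tkey [] ++ [v]))) dist
      ) dist) PySem.Dict.empty
  dist.items.map (fun p => (p.1, p.2.items))

-- ===== PORT B =====
def distribution_group_alt (data : List (String × List (String × List Int))) (genes : List String) (order : List (String × List String)) (select : String) : List (String × List (String × List Int)) :=
  let d0 : List (String × List Int) := match data with
    | [] => []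
    | (_, v) :: _ => v
  let table : PySem.Dict String (PySem.Dict String (List (String × Nat))) :=
    d0.foldl (fun table kv =>
      if PySem.Str.endswith kv.1 select then
        let gkey := ((PySem.Str.split? kv.1 "-").getD []).headD ""
        (List.range kv.2.length).foldl (fun table index =>
          let tkey := ((order.lookup gkey).getD []).getD index ""
          let inner := table.getD gkey PySem.Dict.empty
          table.insert gkey (inner.insert tkey (inner.getD tkey [] ++ [(kv.1, index)]))) table
      else table) PySem.Dict.empty
  table.items.map (fun p =>
    (p.1, p.2.items.map (fun q =>
      (q.1, q.2.flatMap (fun gi =>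
        genes.map (fun gene => ((((data.lookup gene).getD []).lookup gi.1).getD []).getD gi.2 0))))))


-- ===== PRECONDITION & SPEC =====
-- Pre_ = exactly the inputs where Python A returns normally: data is non-empty, and for every
-- selected group of the first gene's dict, `order` has the group's prefix with enough entries,
-- and every gene in `genes` is in `data` with that group present and long enough (else
-- IndexError/KeyError).
def Pre_distribution_group (data : List (String × List (String × List Int))) (genes : List String) (order : List (String × List String)) (select : String) : Prop :=
  data ≠ [] ∧
  ∀ gv : String × List Int,
    gv ∈ (match data with | [] => ([] : List (String × List Int)) | (_, v) :: _ => v) →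
    PySem.Str.endswith gv.1 select = true →
      (let gkey := ((PySem.Str.split? gv.1 "-").getD []).headD ""
       (order.lookup gkey).isSome ∧ gv.2.length ≤ ((order.lookup gkey).getD []).length) ∧
      ∀ gene ∈ genes,
        (data.lookup gene).isSome ∧
        (((data.lookup gene).getD []).lookup gv.1).isSome ∧
        gv.2.length ≤ ((((data.lookup gene).getD []).lookup gv.1).getD []).length
instance (data : List (String × List (String × List Int))) (genes : List String) (order : List (String × List String)) (select : String) : Decidable (Pre_distribution_group data genes order select) := by unfold Pre_distribution_group; infer_instance

def pvWitness_distribution_group : (List (String × List (String × List Int))) × List String × (List (String × List String)) × String :=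
  ([("g", [("a-mean", [1, 2]), ("b-std", [3])])], ["g"], [("a", ["t1", "t2"])], "mean")

def Spec_distribution_group (data : List (String × List (String × List Int))) (genes : List String) (order : List (String × List String)) (select : String) (out : List (String × List (String × List Int))) : Prop := out = distribution_group_alt data genes order select
instance (data : List (String × List (String × List Int))) (genes : List String) (order : List (String × List String)) (select : String) (out : List (String × List (String × List Int))) : Decidable (Spec_distribution_group data genes order select out) := by unfold Spec_distribution_group; infer_instance

-- ===== CLAIM (what is proved, stated in full; the proofs are below) =====
def Claim_equal_distribution_group : Prop := ∀ (data : List (String × List (String × List Int))) (genes : List String) (order : List (String × List String)) (select : String), Dom_distribution_group data genes order select → Pre_distribution_group data genes order select → Spec_distribution_group data genes order select (distribution_group data genes order select)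

-- ===== LEMMAS AND PROOFS =====

-- map a function over the values of a Dict (proof-side device relating B's table to A's dist)
def pvMapVal {β γ : Type} (f : β → γ) (d : PySem.Dict String β) : PySem.Dict String γ :=
  PySem.Dict.mk (d.items.map (fun p => (p.1, f p.2)))

theorem pv_keys_mapVal {β γ : Type} (f : β → γ) (d : PySem.Dict String β) :
    (pvMapVal f d).keys = d.keys := by
  simp [pvMapVal, PySem.Dict.keys, Function.comp]

theorem pv_contains_mapVal {β γ : Type} (f : β → γ) (d : PySem.Dict String β) (k : String) :
    (pvMapVal f d).contains k = d.contains k := by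
  rw [PySem.Dict.contains_eq_decide_mem_keys, PySem.Dict.contains_eq_decide_mem_keys, pv_keys_mapVal]

theorem pv_get?_mapVal {β γ : Type} (f : β → γ) (d : PySem.Dict String β) (k : String) :
    (pvMapVal f d).get? k = (d.get? k).map f := by
  cases d with | mk items =>
  induction items with
  | nil => rfl
  | cons p rest ih =>
    show (PySem.Dict.mk ((p.1, f p.2) :: _)).get? k = _
    rw [PySem.Dict.get?_mk_cons, PySem.Dict.get?_mk_cons]
    by_cases h : p.1 == k
    · simp [h]
    · simp [h]
      exact ih

theorem pv_getD_mapVal {β γ : Type} (f : β → γ) (d : PySem.Dict String β) (k : String) (dflt : β) :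
    (pvMapVal f d).getD k (f dflt) = f (d.getD k dflt) := by
  rw [PySem.Dict.getD_eq_get?_getD, PySem.Dict.getD_eq_get?_getD, pv_get?_mapVal]
  cases d.get? k <;> rfl

theorem pv_mapVal_insert {β γ : Type} (f : β → γ) (d : PySem.Dict String β) (k : String) (v : β) :
    pvMapVal f (d.insert k v) = (pvMapVal f d).insert k (f v) := by
  apply PySem.Dict.ext
  by_cases h : d.contains k
  · rw [show (pvMapVal f (d.insert k v)).items = (d.insert k v).items.map (fun p => (p.1, f p.2)) from rfl,
      PySem.Dict.items_insert_of_contains _ _ h,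
      PySem.Dict.items_insert_of_contains _ _ (by rw [pv_contains_mapVal]; exact h)]
    show _ = ((d.items.map _).map _)
    rw [List.map_map, List.map_map]
    apply List.map_congr_left
    intro p _
    by_cases hp : p.1 = k <;> simp [hp]
  · rw [show (pvMapVal f (d.insert k v)).items = (d.insert k v).items.map (fun p => (p.1, f p.2)) from rfl,
      PySem.Dict.items_insert_of_not_contains _ _ (by simpa using h),
      PySem.Dict.items_insert_of_not_contains _ _ (by rw [pv_contains_mapVal]; simpa using h)]
    simp [pvMapVal]

theorem pv_values_mapVal {β γ : Type} (f : β → γ) (d : PySem.Dict String β) :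
    (pvMapVal f d).values = d.values.map f := by
  simp [pvMapVal, PySem.Dict.values, Function.comp]

theorem pv_getD_mem_values_or {β : Type} (d : PySem.Dict String β) (k : String) (dflt : β) :
    d.getD k dflt = dflt ∨ d.getD k dflt ∈ d.values := by
  rw [PySem.Dict.getD_eq_get?_getD]
  cases h : d.get? k with
  | none => exact Or.inl rfl
  | some v =>
    right
    have hm := PySem.Dict.mem_items_of_get?_eq_some _ h
    show (some v).getD dflt ∈ d.items.map (·.2)
    exact List.mem_map.mpr ⟨(k, v), hm, rfl⟩

theorem pv_insert_getD_self {β : Type} (d : PySem.Dict String β) (k : String) (dflt : β)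
    (hnd : d.keys.Nodup) (hc : d.contains k = true) :
    d.insert k (d.getD k dflt) = d := by
  apply PySem.Dict.ext
  rw [PySem.Dict.items_insert_of_contains _ _ hc]
  conv_rhs => rw [← List.map_id d.items]
  apply List.map_congr_left
  intro p hp
  by_cases hk : p.1 == k
  · have hpk : p.1 = k := by simpa using hk
    have : d.getD p.1 dflt = p.2 := PySem.Dict.getD_of_mem_items _ (by simpa using hp) hnd dflt
    simp [← hpk, this]
  · simp [hk]

def pvVal (data : List (String × List (String × List Int))) (group : String) (index : Nat) (gene : String) : Int :=
  ((((data.lookup gene).getD []).lookup group).getD []).getD index 0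

def pvFill (data : List (String × List (String × List Int))) (genes : List String) (ps : List (String × Nat)) : List Int :=
  ps.flatMap (fun gi => genes.map (fun gene => pvVal data gi.1 gi.2 gene))

def pvRender (data : List (String × List (String × List Int))) (genes : List String)
    (t : PySem.Dict String (PySem.Dict String (List (String × Nat)))) :
    PySem.Dict String (PySem.Dict String (List Int)) :=
  pvMapVal (fun w => pvMapVal (pvFill data genes) w) t

def pvInv {β : Type} (t : PySem.Dict String (PySem.Dict String β)) : Prop :=
  t.keys.Nodup ∧ ∀ w ∈ t.values, w.keys.Nodup

def pvIdxA (data : List (String × List (String × List Int))) (genes : List String)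
    (order : List (String × List String)) (group : String)
    (dist : PySem.Dict String (PySem.Dict String (List Int))) (index : Nat) :
    PySem.Dict String (PySem.Dict String (List Int)) :=
  let gkey := ((PySem.Str.split? group "-").getD []).headD ""
  let tkey := ((order.lookup gkey).getD []).getD index ""
  let dist := if dist.contains gkey then dist else dist.insert gkey PySem.Dict.empty
  let inner0 := dist.getD gkey PySem.Dict.empty
  let dist := if inner0.contains tkey then dist else dist.insert gkey (inner0.insert tkey [])
  genes.foldl (fun dist gene =>
    let v : Int := pvVal data group index gene
    let inner := dist.getD gkey PySem.Dict.empty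
    dist.insert gkey (inner.insert tkey (inner.getD tkey [] ++ [v]))) dist

def pvIdxB (order : List (String × List String)) (group : String)
    (t : PySem.Dict String (PySem.Dict String (List (String × Nat)))) (index : Nat) :
    PySem.Dict String (PySem.Dict String (List (String × Nat))) :=
  let gkey := ((PySem.Str.split? group "-").getD []).headD ""
  let tkey := ((order.lookup gkey).getD []).getD index ""
  let inner := t.getD gkey PySem.Dict.empty
  t.insert gkey (inner.insert tkey (inner.getD tkey [] ++ [(group, index)]))

theorem pv_getD_mapVal' {β γ : Type} (f : β → γ) (d : PySem.Dict String β) (k : String)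
    (b : β) (c : γ) (h : c = f b) : (pvMapVal f d).getD k c = f (d.getD k b) := by
  rw [h]; exact pv_getD_mapVal f d k b

theorem pv_gene_fold (data : List (String × List (String × List Int))) (gkey tkey group : String)
    (index : Nat) (gs : List String) (d : PySem.Dict String (PySem.Dict String (List Int)))
    (inner : PySem.Dict String (List Int)) (l : List Int) :
    gs.foldl (fun dist gene =>
        dist.insert gkey ((dist.getD gkey PySem.Dict.empty).insert tkey
          ((dist.getD gkey PySem.Dict.empty).getD tkey [] ++ [pvVal data group index gene])))
      (d.insert gkey (inner.insert tkey l))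
    = d.insert gkey (inner.insert tkey (l ++ gs.map (pvVal data group index))) := by
  induction gs generalizing l with
  | nil => simp
  | cons g gs ih =>
    simp only [List.foldl_cons, List.map_cons, PySem.Dict.getD_insert_self,
      PySem.Dict.insert_insert_self]
    rw [ih]
    simp

theorem pv_stepA (data : List (String × List (String × List Int))) (genes : List String)
    (order : List (String × List String)) (group : String)
    (dist : PySem.Dict String (PySem.Dict String (List Int))) (index : Nat)
    (hinv : pvInv dist) :
    pvIdxA data genes order group dist index
    = (let gkey := ((PySem.Str.split? group "-").getD []).headD ""
       let tkey := ((order.lookup gkey).getD []).getD index ""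
       let I := dist.getD gkey PySem.Dict.empty
       dist.insert gkey (I.insert tkey (I.getD tkey [] ++ genes.map (pvVal data group index)))) := by
  obtain ⟨hnd, hval⟩ := hinv
  simp only [pvIdxA]
  set gkey := ((PySem.Str.split? group "-").getD []).headD "" with hg
  set tkey := ((order.lookup gkey).getD []).getD index "" with ht
  set I := dist.getD gkey PySem.Dict.empty with hI
  have hInd : I.keys.Nodup := by
    rcases pv_getD_mem_values_or dist gkey PySem.Dict.empty with h | h
    · rw [hI, h]; exact PySem.Dict.nodup_keys_empty
    · exact hval _ h
  by_cases c1 : dist.contains gkey = true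
  · simp only [c1, if_true, ← hI]
    by_cases c2 : I.contains tkey = true
    · simp only [c2, if_true]
      have e1 : I.insert tkey (I.getD tkey []) = I := pv_insert_getD_self I tkey [] hInd c2
      have e2 : dist = dist.insert gkey (I.insert tkey (I.getD tkey [])) := by
        rw [e1, hI]; exact (pv_insert_getD_self dist gkey PySem.Dict.empty hnd c1).symm
      conv_lhs => rw [e2]
      rw [pv_gene_fold]
    · have c2' : I.contains tkey = false := by simpa using c2
      simp only [c2', Bool.false_eq_true, if_false]
      rw [pv_gene_fold, PySem.Dict.getD_of_not_contains _ _ c2']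
  · have c1' : dist.contains gkey = false := by simpa using c1
    simp only [c1', Bool.false_eq_true, if_false, PySem.Dict.getD_insert_self]
    have hIe : I = PySem.Dict.empty := by
      rw [hI]; exact PySem.Dict.getD_of_not_contains _ _ c1'
    have c2 : (PySem.Dict.empty : PySem.Dict String (List Int)).contains tkey = false := by
      simp [PySem.Dict.contains_empty]
    simp only [c2, Bool.false_eq_true, if_false]
    rw [PySem.Dict.insert_insert_self, pv_gene_fold, hIe,
      PySem.Dict.getD_of_not_contains _ _ c2]

theorem pv_invB (order : List (String × List String)) (group : String)
    (t : PySem.Dict String (PySem.Dict String (List (String × Nat)))) (index : Nat)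
    (hinv : pvInv t) : pvInv (pvIdxB order group t index) := by
  obtain ⟨hnd, hval⟩ := hinv
  constructor
  · exact PySem.Dict.nodup_keys_insert _ _ _ hnd
  · intro w hw
    rcases PySem.Dict.mem_values_insert _ _ _ _ hw with h | h
    · subst h
      apply PySem.Dict.nodup_keys_insert
      rcases pv_getD_mem_values_or t _ PySem.Dict.empty with h | h
      · rw [h]; exact PySem.Dict.nodup_keys_empty
      · exact hval _ h
    · exact hval _ h

theorem pv_commute (data : List (String × List (String × List Int))) (genes : List String)
    (order : List (String × List String)) (group : String)
    (t : PySem.Dict String (PySem.Dict String (List (String × Nat)))) (index : Nat)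
    (hinv : pvInv t) :
    pvIdxA data genes order group (pvRender data genes t) index
    = pvRender data genes (pvIdxB order group t index) := by
  have hinvR : pvInv (pvRender data genes t) := by
    obtain ⟨hnd, hval⟩ := hinv
    constructor
    · rw [pvRender, pv_keys_mapVal]; exact hnd
    · intro w hw
      rw [pvRender, pv_values_mapVal] at hw
      obtain ⟨w0, hw0, rfl⟩ := List.mem_map.mp hw
      rw [pv_keys_mapVal]; exact hval _ hw0
  rw [pv_stepA data genes order group _ index hinvR]
  simp only [pvIdxB, pvRender]
  rw [pv_mapVal_insert, pv_mapVal_insert]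
  rw [pv_getD_mapVal' (fun w => pvMapVal (pvFill data genes) w) t _ PySem.Dict.empty
    PySem.Dict.empty rfl]
  congr 1
  congr 1
  rw [pv_getD_mapVal' (pvFill data genes) _ _ [] [] rfl]
  simp [pvFill]

theorem pv_idx_fold (data : List (String × List (String × List Int))) (genes : List String)
    (order : List (String × List String)) (group : String) (idxs : List Nat)
    (t : PySem.Dict String (PySem.Dict String (List (String × Nat)))) (hinv : pvInv t) :
    idxs.foldl (pvIdxA data genes order group) (pvRender data genes t)
      = pvRender data genes (idxs.foldl (pvIdxB order group) t)
    ∧ pvInv (idxs.foldl (pvIdxB order group) t) := by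
  induction idxs generalizing t with
  | nil => exact ⟨rfl, hinv⟩
  | cons i idxs ih =>
    simp only [List.foldl_cons]
    rw [pv_commute data genes order group t i hinv]
    exact ih _ (pv_invB order group t i hinv)

theorem pv_outer_fold (data : List (String × List (String × List Int))) (genes : List String)
    (order : List (String × List String)) (select : String)
    (l : List (String × List Int))
    (t : PySem.Dict String (PySem.Dict String (List (String × Nat)))) (hinv : pvInv t) :
    ((l.filter (fun kv => PySem.Str.endswith kv.1 select)).map (fun kv => (kv.1, kv.2.length))).foldl
        (fun dist gl => (List.range gl.2).foldl (pvIdxA data genes order gl.1) dist)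
        (pvRender data genes t)
      = pvRender data genes (l.foldl (fun tb kv =>
          if PySem.Str.endswith kv.1 select then
            (List.range kv.2.length).foldl (pvIdxB order kv.1) tb
          else tb) t)
    ∧ pvInv (l.foldl (fun tb kv =>
        if PySem.Str.endswith kv.1 select then
          (List.range kv.2.length).foldl (pvIdxB order kv.1) tb
        else tb) t) := by
  induction l generalizing t with
  | nil => exact ⟨rfl, hinv⟩
  | cons kv l ih =>
    by_cases h : PySem.Str.endswith kv.1 select
    · simp only [List.filter_cons, h, if_true, List.map_cons, List.foldl_cons]
      obtain ⟨h1, h2⟩ := pv_idx_fold data genes order kv.1 (List.range kv.2.length) t hinv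
      rw [h1]
      exact ih _ h2
    · simp only [List.filter_cons, h, List.foldl_cons]
      exact ih t hinv

def pvD0 (data : List (String × List (String × List Int))) : List (String × List Int) :=
  match data with | [] => [] | (_, v) :: _ => v

theorem pvA_eq (data : List (String × List (String × List Int))) (genes : List String) (order : List (String × List String)) (select : String) :
    distribution_group data genes order select
    = ((((pvD0 data).filter (fun kv : String × List Int => PySem.Str.endswith kv.1 select)).map
        (fun kv : String × List Int => (kv.1, kv.2.length))).foldl
        (fun dist (gl : String × Nat) => (List.range gl.2).foldl (pvIdxA data genes order gl.1) dist)
        PySem.Dict.empty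
      ).items.map (fun p : String × PySem.Dict String (List Int) => (p.1, p.2.items)) := rfl

theorem pvB_eq (data : List (String × List (String × List Int))) (genes : List String) (order : List (String × List String)) (select : String) :
    distribution_group_alt data genes order select
    = ((pvD0 data).foldl (fun tb (kv : String × List Int) =>
          if PySem.Str.endswith kv.1 select then
            (List.range kv.2.length).foldl (pvIdxB order kv.1) tb
          else tb) PySem.Dict.empty
      ).items.map (fun p : String × PySem.Dict String (List (String × Nat)) =>
        (p.1, p.2.items.map (fun q : String × List (String × Nat) => (q.1, pvFill data genes q.2)))) := rfl

theorem pv_main (data : List (String × List (String × List Int))) (genes : List String) (order : List (String × List String)) (select : String) :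
    distribution_group data genes order select = distribution_group_alt data genes order select := by
  have hinv0 : pvInv (PySem.Dict.empty : PySem.Dict String (PySem.Dict String (List (String × Nat)))) :=
    ⟨PySem.Dict.nodup_keys_empty, by intro w hw; simp [PySem.Dict.values, PySem.Dict.empty] at hw⟩
  have h2 : ∀ X : PySem.Dict String (PySem.Dict String (List (String × Nat))),
      (pvRender data genes X).items.map (fun p : String × PySem.Dict String (List Int) => (p.1, p.2.items))
      = X.items.map (fun p : String × PySem.Dict String (List (String × Nat)) =>
          (p.1, p.2.items.map (fun q : String × List (String × Nat) => (q.1, pvFill data genes q.2)))) := by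
    intro X
    show (X.items.map (fun p : String × PySem.Dict String (List (String × Nat)) =>
        (p.1, pvMapVal (pvFill data genes) p.2))).map
        (fun p : String × PySem.Dict String (List Int) => (p.1, p.2.items)) = _
    rw [List.map_map]
    rfl
  obtain ⟨h1, -⟩ := pv_outer_fold data genes order select (pvD0 data) PySem.Dict.empty hinv0
  rw [show pvRender data genes PySem.Dict.empty = PySem.Dict.empty from rfl] at h1
  rw [pvA_eq, pvB_eq, h1, h2]

-- ===== VERDICT (by name: the statement is the Claim_ definition above) =====
theorem distribution_group_spec : Claim_equal_distribution_group := by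
  intro data genes order select _ _
  exact pv_main data genes order select
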